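-- pv_equiv track=rewrite | github.com/imrishi007/financial-document-analysis | scripts/run_all_improvements.py | _split_by_date
-- ===== SOURCE A (Python) =====
-- def _split_by_date(dates, direction_labels):
--     """Temporal split: train <= 2022, val = 2023, test >= 2024."""
--     train, val, test = [], [], []
--     for i, d in enumerate(dates):
--         if direction_labels[i] < 0:
--             continue
--         if d <= "2022-12-31":
--             train.append(i)
--         elif d <= "2023-12-31":
--             val.append(i)
--         else:
--             test.append(i)
--     return train, val, test
-- ===== SOURCE B (Python) =====
-- def _split_by_date(dates, direction_labels):
--     """Temporal split: train <= 2022, val = 2023, test >= 2024.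
--
--     Divide-and-conquer over the index range: classify single indices at the
--     leaves and concatenate the three sorted index lists of the two halves.
--     Correct because each output list is in increasing index order, so the
--     left half's lists concatenated with the right half's give the whole."""
--     def go(lo, hi):
--         if hi <= lo:
--             return [], [], []
--         if hi == lo + 1:
--             i = lo
--             if direction_labels[i] < 0:
--                 return [], [], []
--             d = dates[i]
--             if d <= "2022-12-31":
--                 return [i], [], []
--             if d <= "2023-12-31":
--                 return [], [i], []
--             return [], [], [i]
--         mid = (lo + hi) // 2
--         t1, v1, s1 = go(lo, mid)
--         t2, v2, s2 = go(mid, hi)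
--         return t1 + t2, v1 + v2, s1 + s2
--     return go(0, len(dates))
-- ===== Notes on version B (the rewrite author's own statement) =====
-- stated objective: alternative
-- what changed: Replaces A's single left-to-right loop appending into three accumulators with a divide-and-conquer recursion over the index range that classifies leaves and concatenates the two halves' three lists.
import Mathlib
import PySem

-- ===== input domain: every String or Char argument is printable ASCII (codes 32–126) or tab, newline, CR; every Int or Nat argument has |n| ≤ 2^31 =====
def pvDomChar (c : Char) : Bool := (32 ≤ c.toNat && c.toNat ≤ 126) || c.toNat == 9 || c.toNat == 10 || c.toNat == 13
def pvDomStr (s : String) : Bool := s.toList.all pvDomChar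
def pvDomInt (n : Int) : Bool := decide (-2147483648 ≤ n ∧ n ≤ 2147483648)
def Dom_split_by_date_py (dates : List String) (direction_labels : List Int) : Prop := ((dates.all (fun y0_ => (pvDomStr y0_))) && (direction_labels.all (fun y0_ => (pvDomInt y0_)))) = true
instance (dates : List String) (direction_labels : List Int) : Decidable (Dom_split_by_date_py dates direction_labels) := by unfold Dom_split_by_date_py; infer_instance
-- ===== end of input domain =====

-- B computes the same three index lists by divide-and-conquer over the index range
-- (classify leaves, concatenate halves) instead of A's single accumulating loop
-- (objective: alternative algorithm).


-- shared helper: Python's lexicographic `<=` on strings (code-point order), over the char lists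
def pvChLe : List Char → List Char → Bool
  | [], _ => true
  | _ :: _, [] => false
  | a :: as, b :: bs => if a < b then true else if a = b then pvChLe as bs else false

def pvStrLe (a b : String) : Bool := pvChLe a.toList b.toList

-- ===== PORT A =====
-- A's single for-loop over enumerate(dates) with three list accumulators.
-- direction_labels[i] raises IndexError when i is out of range; Pre_ excludes that,
-- so the `.getD 0` default here is never reached on admitted inputs.
def pvSplitLoopA (labels : List Int) : List (Int × String) → List Int × List Int × List Int → List Int × List Int × List Int
  | [], acc => acc
  | (i, d) :: rest, (tr, va, te) =>
    if PySem.List.pyGetD labels i 0 < 0 then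
      pvSplitLoopA labels rest (tr, va, te)
    else if pvStrLe d "2022-12-31" then
      pvSplitLoopA labels rest (tr ++ [i], va, te)
    else if pvStrLe d "2023-12-31" then
      pvSplitLoopA labels rest (tr, va ++ [i], te)
    else
      pvSplitLoopA labels rest (tr, va, te ++ [i])

def split_by_date_py (dates : List String) (direction_labels : List Int) : List Int × List Int × List Int :=
  pvSplitLoopA direction_labels (PySem.List.enumerate dates) ([], [], [])

-- ===== PORT B =====
-- B's recursive go(lo, hi): leaves classify one index, inner nodes split at
-- mid = (lo+hi)//2 and concatenate. Indexing dates[i]/direction_labels[i] uses the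
-- same pyGetD defaults as port A (only out-of-range under ¬Pre_, where Python raises).
-- (lo+hi)//2 is Nat division here: lo, hi are nonnegative, where Python's // agrees with it.
def pvGoB (dates : List String) (labels : List Int) (lo hi : Nat) : List Int × List Int × List Int :=
  if hi ≤ lo then ([], [], [])
  else if hi = lo + 1 then
    let i : Int := lo
    if PySem.List.pyGetD labels i 0 < 0 then ([], [], [])
    else
      let d := PySem.List.pyGetD dates i ""
      if pvStrLe d "2022-12-31" then ([i], [], [])
      else if pvStrLe d "2023-12-31" then ([], [i], [])
      else ([], [], [i])
  else
    ((pvGoB dates labels lo ((lo + hi) / 2)).1 ++ (pvGoB dates labels ((lo + hi) / 2) hi).1,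
     (pvGoB dates labels lo ((lo + hi) / 2)).2.1 ++ (pvGoB dates labels ((lo + hi) / 2) hi).2.1,
     (pvGoB dates labels lo ((lo + hi) / 2)).2.2 ++ (pvGoB dates labels ((lo + hi) / 2) hi).2.2)
termination_by hi - lo
decreasing_by all_goals omega

def split_by_date_py_alt (dates : List String) (direction_labels : List Int) : List Int × List Int × List Int :=
  pvGoB dates direction_labels 0 dates.length

-- ===== PRECONDITION & SPEC =====
-- A indexes direction_labels[i] for every i < len(dates): IndexError (A raises, B too)
-- when the label list is shorter than dates; Pre_ excludes exactly those inputs.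
def Pre_split_by_date_py (dates : List String) (direction_labels : List Int) : Prop :=
  dates.length ≤ direction_labels.length
instance (dates : List String) (direction_labels : List Int) : Decidable (Pre_split_by_date_py dates direction_labels) := by unfold Pre_split_by_date_py; infer_instance

def pvWitness_split_by_date_py : List String × List Int :=
  (["2021-01-05", "2023-06-01", "2024-02-02", "2022-12-31"], [1, 0, 2, -1])

def Spec_split_by_date_py (dates : List String) (direction_labels : List Int) (out : List Int × List Int × List Int) : Prop := out = split_by_date_py_alt dates direction_labels
instance (dates : List String) (direction_labels : List Int) (out : List Int × List Int × List Int) : Decidable (Spec_split_by_date_py dates direction_labels out) := by unfold Spec_split_by_date_py; infer_instance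

-- ===== CLAIM (what is proved, stated in full; the proofs are below) =====
def Claim_equal_split_by_date_py : Prop := ∀ (dates : List String) (direction_labels : List Int), Dom_split_by_date_py dates direction_labels → Pre_split_by_date_py dates direction_labels → Spec_split_by_date_py dates direction_labels (split_by_date_py dates direction_labels)

-- ===== LEMMAS AND PROOFS =====

-- the three membership tests, as functions of the index alone
def pvF1 (dates : List String) (labels : List Int) (i : Int) : Option Int :=
  if !(PySem.List.pyGetD labels i 0 < 0) && pvStrLe (PySem.List.pyGetD dates i "") "2022-12-31" then some i else none
def pvF2 (dates : List String) (labels : List Int) (i : Int) : Option Int :=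
  if !(PySem.List.pyGetD labels i 0 < 0) && !pvStrLe (PySem.List.pyGetD dates i "") "2022-12-31" && pvStrLe (PySem.List.pyGetD dates i "") "2023-12-31" then some i else none
def pvF3 (dates : List String) (labels : List Int) (i : Int) : Option Int :=
  if !(PySem.List.pyGetD labels i 0 < 0) && !pvStrLe (PySem.List.pyGetD dates i "") "2023-12-31" then some i else none

-- Python string `<=` is transitive (d ≤ "2022-12-31" → d ≤ "2023-12-31")
theorem pvChLe_trans (a b c : List Char) (h1 : pvChLe a b = true) (h2 : pvChLe b c = true) :
    pvChLe a c = true := by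
  induction a generalizing b c with
  | nil => simp [pvChLe]
  | cons x as ih =>
    cases b with
    | nil => simp [pvChLe] at h1
    | cons y bs =>
      cases c with
      | nil => simp [pvChLe] at h2
      | cons z cs =>
        simp only [pvChLe] at h1 h2 ⊢
        by_cases hxy : x < y
        · by_cases hyz : y < z
          · simp [lt_trans hxy hyz]
          · simp only [if_neg hyz] at h2
            by_cases hyzeq : y = z
            · subst hyzeq; simp [hxy]
            · simp [hyzeq] at h2
        · simp only [if_neg hxy] at h1
          by_cases hxyeq : x = y
          · subst hxyeq
            simp only [reduceIte] at h1
            by_cases hyz : x < z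
            · simp [hyz]
            · simp only [if_neg hyz] at h2 ⊢
              by_cases hyzeq : x = z
              · subst hyzeq
                simp only [reduceIte] at h2 ⊢
                exact ih bs cs h1 h2
              · simp [hyzeq] at h2
          · simp [hxyeq] at h1

theorem pvStrLe_2223 (d : String) (h : pvStrLe d "2022-12-31" = true) :
    pvStrLe d "2023-12-31" = true :=
  pvChLe_trans _ _ _ h (by decide)

-- A's loop over any pair list = the three filtered passes appended to the accumulators,
-- with the pair's date replaced by pyGetD when the pairs come from enumerate (stated
-- for pairs of the enumerate-of-pyRange shape, which is how it is used below).
theorem pvSplitLoopA_eq (dates : List String) (labels : List Int) (is : List Int)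
    (tr va te : List Int) :
    pvSplitLoopA labels (is.map (fun j => (j, PySem.List.pyGetD dates j ""))) (tr, va, te) =
      (tr ++ is.filterMap (pvF1 dates labels),
       va ++ is.filterMap (pvF2 dates labels),
       te ++ is.filterMap (pvF3 dates labels)) := by
  induction is generalizing tr va te with
  | nil => simp [pvSplitLoopA]
  | cons i rest ih =>
    set d := PySem.List.pyGetD dates i "" with hd
    by_cases hneg : PySem.List.pyGetD labels i 0 < 0
    · simp [pvSplitLoopA, hneg, pvF1, pvF2, pvF3, ← hd, ih]
    · have hpos := not_lt.mp hneg
      by_cases h22 : pvStrLe d "2022-12-31" = true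
      · have h23 : pvStrLe d "2023-12-31" = true := pvStrLe_2223 d h22
        simp [pvSplitLoopA, hneg, hpos, h22, h23, pvF1, pvF2, pvF3, ← hd, ih]
      · by_cases h23 : pvStrLe d "2023-12-31" = true
        · simp [pvSplitLoopA, hneg, hpos, h22, h23, pvF1, pvF2, pvF3, ← hd, ih]
        · simp [pvSplitLoopA, hneg, hpos, h22, h23, pvF1, pvF2, pvF3, ← hd, ih]

-- B's recursion computes the same three filtered passes over pyRange lo hi 1
-- (strong induction via a fuel bound on hi - lo).
theorem pvGoB_eq_aux (dates : List String) (labels : List Int) (n : Nat) :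
    ∀ lo hi : Nat, hi - lo ≤ n → pvGoB dates labels lo hi =
      ((PySem.List.pyRange lo hi 1).filterMap (pvF1 dates labels),
       (PySem.List.pyRange lo hi 1).filterMap (pvF2 dates labels),
       (PySem.List.pyRange lo hi 1).filterMap (pvF3 dates labels)) := by
  induction n with
  | zero =>
    intro lo hi hn
    rw [pvGoB]
    simp [(by omega : hi ≤ lo), PySem.List.pyRange_one_eq_nil (Nat.cast_le.mpr (by omega : hi ≤ lo))]
  | succ n ih =>
    intro lo hi hn
    rw [pvGoB]
    by_cases hle : hi ≤ lo
    · simp [hle, PySem.List.pyRange_one_eq_nil (Nat.cast_le.mpr hle)]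
    · by_cases heq : hi = lo + 1
      · have hrange : PySem.List.pyRange (lo : Int) (hi : Int) 1 = [(lo : Int)] := by
          subst heq; push_cast; exact PySem.List.pyRange_one_singleton lo
        simp only [if_neg hle, if_pos heq, hrange]
        by_cases hneg : labels[lo]?.getD 0 < 0
        · simp [hneg, pvF1, pvF2, pvF3]
        · have hpos := not_lt.mp hneg
          by_cases h22 : pvStrLe (dates[lo]?.getD "") "2022-12-31" = true
          · have h23 := pvStrLe_2223 _ h22
            simp [hneg, hpos, h22, h23, pvF1, pvF2, pvF3]
          · by_cases h23 : pvStrLe (dates[lo]?.getD "") "2023-12-31" = true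
            · simp [hneg, hpos, h22, h23, pvF1, pvF2, pvF3]
            · simp [hneg, hpos, h22, h23, pvF1, pvF2, pvF3]
      · have hm1 : lo ≤ (lo + hi) / 2 := by omega
        have hm2 : (lo + hi) / 2 ≤ hi := by omega
        have hsplit := PySem.List.pyRange_one_append (lo : Int) (((lo + hi) / 2 : Nat) : Int)
          (hi : Int) (Nat.cast_le.mpr hm1) (Nat.cast_le.mpr hm2)
        rw [if_neg hle, if_neg heq,
          ih lo ((lo + hi) / 2) (by omega), ih ((lo + hi) / 2) hi (by omega)]
        simp [hsplit, List.filterMap_append]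

theorem pvGoB_eq (dates : List String) (labels : List Int) (lo hi : Nat) :
    pvGoB dates labels lo hi =
      ((PySem.List.pyRange lo hi 1).filterMap (pvF1 dates labels),
       (PySem.List.pyRange lo hi 1).filterMap (pvF2 dates labels),
       (PySem.List.pyRange lo hi 1).filterMap (pvF3 dates labels)) :=
  pvGoB_eq_aux dates labels (hi - lo) lo hi le_rfl

-- ===== VERDICT (by name: the statement is the Claim_ definition above) =====
theorem split_by_date_py_spec : Claim_equal_split_by_date_py := by
  intro dates labels _ _
  unfold Spec_split_by_date_py split_by_date_py split_by_date_py_alt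
  rw [PySem.List.enumerate_eq_map_pyRange dates ""]
  have hr : PySem.List.pyRange 0 (PySem.List.len dates) 1 =
      PySem.List.pyRange (0 : Nat) (dates.length : Int) 1 := by
    simp [PySem.List.len]
  rw [hr, pvSplitLoopA_eq dates labels _ [] [] [], pvGoB_eq]
  simp
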